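-- pv_equiv track=rewrite | github.com/Tsunami43/gsparse | src/gsparse/utils/data_utils.py | find_empty_columns
-- ===== SOURCE A (Python) =====
-- from typing import Any
--
-- def find_empty_columns(data: list[list[Any]]) -> list[int]:
-- 	"""Finds empty columns in data.
--
-- 	Args:
-- 	    data: Two-dimensional data array
--
-- 	Returns:
-- 	    List of empty column indices (starting from 0)
-- 	"""
-- 	if not data:
-- 		return []
--
-- 	empty_columns = []
-- 	max_cols = max(len(row) for row in data) if data else 0
--
-- 	for col in range(max_cols):
-- 		is_empty = True
-- 		for row in data:
-- 			if col < len(row) and row[col] is not None and str(row[col]).strip():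
-- 				is_empty = False
-- 				break
--
-- 		if is_empty:
-- 			empty_columns.append(col)
--
-- 	return empty_columns
-- ===== SOURCE B (Python) =====
-- def find_empty_columns(data: list[list] ) -> list:
--     """Finds empty columns in data (single flat pass + range filter)."""
--     if not data:
--         return []
--     max_cols = max(len(row) for row in data)
--     non_empty = set()
--     for row in data:
--         for j, val in enumerate(row):
--             if val is not None and str(val).strip():
--                 non_empty.add(j)
--     return [c for c in range(max_cols) if c not in non_empty]
-- ===== Notes on version B (the rewrite author's own statement) =====
-- stated objective: alternative
-- what changed: Replaced the column-outer/row-inner rescanning loop with early break by a single row-major pass accumulating the set of non-empty column indices, then a filter over range(max_cols).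
import Mathlib
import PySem

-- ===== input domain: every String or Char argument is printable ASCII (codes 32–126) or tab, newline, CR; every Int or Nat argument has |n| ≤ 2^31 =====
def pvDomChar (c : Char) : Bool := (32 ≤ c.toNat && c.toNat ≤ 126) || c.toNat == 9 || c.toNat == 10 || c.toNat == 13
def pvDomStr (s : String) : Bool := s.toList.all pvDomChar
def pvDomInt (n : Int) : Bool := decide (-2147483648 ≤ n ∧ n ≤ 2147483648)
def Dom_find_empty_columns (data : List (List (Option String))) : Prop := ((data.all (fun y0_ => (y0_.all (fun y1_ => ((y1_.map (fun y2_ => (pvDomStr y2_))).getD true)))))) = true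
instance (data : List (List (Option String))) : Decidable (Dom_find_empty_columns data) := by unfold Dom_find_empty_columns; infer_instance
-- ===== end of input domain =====

-- B replaces A's column-outer/row-inner scan-with-break by one flat pass over all cells
-- accumulating the set of non-empty columns, then filters range(max_cols) — an alternative flat-pass decomposition (return value identical).


-- ===== PORT A =====
-- 'col < len(row) and row[col] is not None and str(row[col]).strip()'
def pvHitA (row : List (Option String)) (col : Int) : Bool :=
  decide (col < (row.length : Int)) &&
    (match PySem.List.pyGet? row col with
     | some (some s) => !(PySem.Str.strip s == "")
     | _ => false)

-- the inner 'for row in data: … break' loop: returns is_empty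
def pvIsEmptyA (col : Int) : List (List (Option String)) → Bool
  | [] => true
  | row :: rest => if pvHitA row col then false else pvIsEmptyA col rest

def find_empty_columns (data : List (List (Option String))) : List Int :=
  if data.isEmpty then []
  else
    let max_cols : Int :=
      if data.isEmpty then 0
      else (PySem.List.max? (data.map (fun row => (row.length : Int))) (fun x => x)).getD 0
    (PySem.List.pyRange 0 max_cols 1).foldl
      (fun acc col => if pvIsEmptyA col data then acc ++ [col] else acc) []

-- ===== PORT B =====
-- 'val is not None and str(val).strip()'
def pvHitB (val : Option String) : Bool :=
  match val with
  | some s => !(PySem.Str.strip s == "")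
  | none => false

-- inner 'for j, val in enumerate(row): …'
def pvAddRow (s : PySem.Set Int) (row : List (Option String)) : PySem.Set Int :=
  (PySem.List.enumerate row 0).foldl
    (fun s p => if pvHitB p.2 then PySem.Set.add s p.1 else s) s

def find_empty_columns_alt (data : List (List (Option String))) : List Int :=
  match data with
  | [] => []
  | _ :: _ =>
    let max_cols : Int :=
      (PySem.List.max? (data.map (fun row => (row.length : Int))) (fun x => x)).getD 0
    let nonEmpty : PySem.Set Int := data.foldl pvAddRow PySem.Set.empty
    (PySem.List.pyRange 0 max_cols 1).filter (fun c => !(PySem.Set.contains nonEmpty c))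

-- ===== PRECONDITION & SPEC =====
def Spec_find_empty_columns (data : List (List (Option String))) (out : List Int) : Prop := out = find_empty_columns_alt data
instance (data : List (List (Option String))) (out : List Int) : Decidable (Spec_find_empty_columns data out) := by unfold Spec_find_empty_columns; infer_instance

-- ===== CLAIM (what is proved, stated in full; the proofs are below) =====
def Claim_equal_find_empty_columns : Prop := ∀ (data : List (List (Option String))), Dom_find_empty_columns data → Spec_find_empty_columns data (find_empty_columns data)

-- ===== LEMMAS AND PROOFS =====

-- a row "hits" column c iff its enumerate-loop adds c
lemma enum_hit (row : List (Option String)) (s c : Int) :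
    (∃ p ∈ PySem.List.enumerate row s, pvHitB p.2 = true ∧ p.1 = c) ↔
      ∃ k : Nat, k < row.length ∧ pvHitB (row.getD k none) = true ∧ c = s + k := by
  induction row generalizing s with
  | nil => simp [PySem.List.enumerate]
  | cons x xs ih =>
    rw [PySem.List.enumerate_cons]
    constructor
    · rintro ⟨p, hp, hhit, hpc⟩
      rcases List.mem_cons.mp hp with hp | hp
      · subst hp; exact ⟨0, by simp, by simpa using hhit, by simpa using hpc.symm⟩
      · obtain ⟨k, hk, hh, hc⟩ := (ih (s+1)).mp ⟨p, hp, hhit, hpc⟩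
        exact ⟨k+1, by simpa using hk, by simpa using hh, by push_cast at hc ⊢; omega⟩
    · rintro ⟨k, hk, hh, hc⟩
      cases k with
      | zero => exact ⟨(s, x), List.mem_cons_self .., by simpa using hh, by simpa using hc.symm⟩
      | succ k =>
        obtain ⟨p, hp, h1, h2⟩ :=
          (ih (s+1)).mpr ⟨k, by simpa using hk, by simpa using hh, by push_cast at hc ⊢; omega⟩
        exact ⟨p, List.mem_cons_of_mem _ hp, h1, h2⟩

lemma mem_addRow (s : PySem.Set Int) (row : List (Option String)) (c : Int) :
    c ∈ pvAddRow s row ↔ c ∈ s ∨ ∃ p ∈ PySem.List.enumerate row 0, pvHitB p.2 = true ∧ p.1 = c := by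
  unfold pvAddRow
  generalize PySem.List.enumerate row 0 = l
  induction l generalizing s with
  | nil => simp
  | cons p l ih =>
    simp only [List.foldl_cons, ih]
    split
    · rename_i h
      rw [PySem.Set.mem_add]
      constructor
      · rintro ((h1 | h1) | h1)
        · exact .inl h1
        · exact .inr ⟨p, List.mem_cons_self .., h, h1.symm⟩
        · obtain ⟨q, hq, h2, h3⟩ := h1
          exact .inr ⟨q, List.mem_cons_of_mem _ hq, h2, h3⟩
      · rintro (h1 | ⟨q, hq, h2, h3⟩)
        · exact .inl (.inl h1)
        · rcases List.mem_cons.mp hq with hq | hq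
          · subst hq; exact .inl (.inr h3.symm)
          · exact .inr ⟨q, hq, h2, h3⟩
    · rename_i h
      constructor
      · rintro (h1 | ⟨q, hq, h2, h3⟩)
        · exact .inl h1
        · exact .inr ⟨q, List.mem_cons_of_mem _ hq, h2, h3⟩
      · rintro (h1 | ⟨q, hq, h2, h3⟩)
        · exact .inl h1
        · rcases List.mem_cons.mp hq with hq | hq
          · subst hq; simp [h2] at h
          · exact .inr ⟨q, hq, h2, h3⟩

lemma mem_foldl_addRow (data : List (List (Option String))) (s : PySem.Set Int) (c : Int) :
    c ∈ data.foldl pvAddRow s ↔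
      c ∈ s ∨ ∃ row ∈ data, ∃ p ∈ PySem.List.enumerate row 0, pvHitB p.2 = true ∧ p.1 = c := by
  induction data generalizing s with
  | nil => simp
  | cons r rs ih =>
    simp only [List.foldl_cons, ih, mem_addRow]
    aesop

-- A's per-column hit test agrees with B's per-cell test, for 0 ≤ c
lemma hitA_iff (row : List (Option String)) (c : Int) (hc : 0 ≤ c) :
    pvHitA row c = true ↔ ∃ p ∈ PySem.List.enumerate row 0, pvHitB p.2 = true ∧ p.1 = c := by
  rw [enum_hit]
  unfold pvHitA
  constructor
  · intro h
    rw [Bool.and_eq_true] at h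
    obtain ⟨h1, h2⟩ := h
    have hlt : c < (row.length : Int) := of_decide_eq_true h1
    rw [PySem.List.pyGet?_eq_some_getElem row hc hlt] at h2
    refine ⟨c.toNat, by omega, ?_, by omega⟩
    rw [List.getD_eq_getElem _ _ (by omega)]
    cases hx : row[c.toNat] with
    | none => rw [hx] at h2; simp at h2
    | some v => rw [hx] at h2; simpa [pvHitB] using h2
  · rintro ⟨k, hk, hh, hc'⟩
    obtain rfl : c = (k : Int) := by omega
    have hlt : (k : Int) < (row.length : Int) := by exact_mod_cast hk
    rw [Bool.and_eq_true, PySem.List.pyGet?_eq_some_getElem row hc hlt]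
    refine ⟨by simpa using hlt, ?_⟩
    rw [List.getD_eq_getElem _ _ hk] at hh
    simp only [Int.toNat_natCast]
    cases hx : row[k] with
    | none => rw [hx] at hh; simp [pvHitB] at hh
    | some v => rw [hx] at hh; simpa [pvHitB] using hh

-- A's break-loop computes "no row hits c"
lemma isEmptyA_iff (data : List (List (Option String))) (c : Int) :
    pvIsEmptyA c data = true ↔ ∀ row ∈ data, pvHitA row c = false := by
  induction data with
  | nil => simp [pvIsEmptyA]
  | cons r rs ih =>
    unfold pvIsEmptyA
    split
    · rename_i h; simp; intro hf; rw [hf] at h; simp_all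
    · rename_i h; rw [ih]; simp at h; simp [h]

-- ===== VERDICT (by name: the statement is the Claim_ definition above) =====
theorem find_empty_columns_spec : Claim_equal_find_empty_columns := by
  intro data _
  unfold Spec_find_empty_columns find_empty_columns find_empty_columns_alt
  cases data with
  | nil => simp
  | cons r rs =>
    simp only [List.isEmpty_cons, Bool.false_eq_true, if_false]
    rw [PySem.List.foldl_append_if_eq_filter, List.nil_append]
    apply List.filter_congr
    intro c hc
    have hc0 : 0 ≤ c := (PySem.List.mem_pyRange_one.mp hc).1
    rw [Bool.eq_iff_iff, isEmptyA_iff, Bool.not_eq_eq_eq_not, Bool.not_true,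
      ← Bool.not_eq_true, PySem.Set.contains_iff, mem_foldl_addRow]
    simp only [PySem.Set.empty, List.not_mem_nil, false_or]
    constructor
    · rintro h ⟨row, hrow, hex⟩
      have := h row hrow
      rw [← Bool.not_eq_true, hitA_iff row c hc0] at this
      exact this hex
    · intro h row hrow
      rw [← Bool.not_eq_true, hitA_iff row c hc0]
      intro hex
      exact h ⟨row, hrow, hex⟩
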